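-- pv_equiv track=rewrite | github.com/zack7wong/spiders | homeWork/other/ganzhi.py | Decimalint_to_sexagenary
-- ===== SOURCE A (Python) =====
-- def Decimalint_to_sexagenary(num):
--     '''
--     把一个十进制数字转换为干支序列数字
--     :param num: 输入的十进制数字，int型
--     :return: 干支序列字符串
--     '''
--     num = int(num)
--     x = 60
--     a = ['甲子', '乙丑', '丙寅', '丁卯', '戊辰', '己巳', '庚午', '辛未', '壬申', '癸酉', '甲戌', '乙亥', '丙子', '丁丑', '戊寅', '己卯', '庚辰', '辛巳',
--          '壬午', '癸未', '甲申', '乙酉', '丙戌', '丁亥', '戊子', '己丑', '庚寅', '辛卯', '壬辰', '癸巳', '甲午', '乙未', '丙申', '丁酉', '戊戌', '己亥',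
--          '庚子', '辛丑', '壬寅', '癸卯', '甲辰', '乙巳', '丙午', '丁未', '戊申', '己酉', '庚戌', '辛亥', '壬子', '癸丑', '甲寅', '乙卯', '丙辰', '丁巳',
--          '戊午', '己未', '庚申', '辛酉', '壬戌', '癸亥']
--     # a=[0,1,2,3,4,5,6,7,8,9]
--     b = []
--     while True:
--         s = num // x  # 商
--         y = num % x  # 余数
--         b = b + [y]
--         if s == 0:
--             break
--         num = s
--     b.reverse()
--     myres = ''
--     for i in b:
--         myres += a[i]
--     return myres
-- ===== SOURCE B (Python) =====
-- def Decimalint_to_sexagenary(num):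
--     '''
--     把一个十进制数字转换为干支序列数字
--     :param num: 输入的十进制数字，int型
--     :return: 干支序列字符串
--     '''
--     num = int(num)
--     a = ['甲子', '乙丑', '丙寅', '丁卯', '戊辰', '己巳', '庚午', '辛未', '壬申', '癸酉', '甲戌', '乙亥', '丙子', '丁丑', '戊寅', '己卯', '庚辰', '辛巳',
--          '壬午', '癸未', '甲申', '乙酉', '丙戌', '丁亥', '戊子', '己丑', '庚寅', '辛卯', '壬辰', '癸巳', '甲午', '乙未', '丙申', '丁酉', '戊戌', '己亥',
--          '庚子', '辛丑', '壬寅', '癸卯', '甲辰', '乙巳', '丙午', '丁未', '戊申', '己酉', '庚戌', '辛亥', '壬子', '癸丑', '甲寅', '乙卯', '丙辰', '丁巳',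
--          '戊午', '己未', '庚申', '辛酉', '壬戌', '癸亥']
--
--     def rec(n):
--         q, r = divmod(n, 60)
--         if q == 0:
--             return a[r]
--         return rec(q) + a[r]
--
--     return rec(num)
-- ===== Notes on version B (the rewrite author's own statement) =====
-- stated objective: simpler
-- what changed: B replaces A's digit-collecting while loop + list reversal + concatenation pass by a single recursive base-60 conversion (rec(num//60) + a[num%60]) that builds the string high digit first.
import Mathlib
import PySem

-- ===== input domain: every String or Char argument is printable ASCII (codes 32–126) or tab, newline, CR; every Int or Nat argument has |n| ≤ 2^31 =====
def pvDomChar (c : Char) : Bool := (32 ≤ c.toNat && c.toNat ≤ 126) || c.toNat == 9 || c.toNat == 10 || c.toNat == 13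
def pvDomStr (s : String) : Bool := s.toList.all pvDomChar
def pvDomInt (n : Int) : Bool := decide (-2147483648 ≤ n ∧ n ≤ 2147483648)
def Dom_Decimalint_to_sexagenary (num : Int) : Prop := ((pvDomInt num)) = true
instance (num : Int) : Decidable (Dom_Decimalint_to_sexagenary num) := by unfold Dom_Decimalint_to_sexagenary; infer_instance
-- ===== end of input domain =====

-- B rewrites A's while-loop (collect remainders, reverse, concatenate) as one direct
-- recursive base-60 conversion; same result, simpler decomposition.
-- Both programs diverge on negative input (A's while loop never terminates), so Pre_ requires 0 ≤ num.

-- the 60-element ganzhi table shared by both Pythons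
def pvGanzhi : List String := ["甲子", "乙丑", "丙寅", "丁卯", "戊辰", "己巳", "庚午", "辛未", "壬申", "癸酉", "甲戌", "乙亥", "丙子", "丁丑", "戊寅", "己卯", "庚辰", "辛巳", "壬午", "癸未", "甲申", "乙酉", "丙戌", "丁亥", "戊子", "己丑", "庚寅", "辛卯", "壬辰", "癸巳", "甲午", "乙未", "丙申", "丁酉", "戊戌", "己亥", "庚子", "辛丑", "壬寅", "癸卯", "甲辰", "乙巳", "丙午", "丁未", "戊申", "己酉", "庚戌", "辛亥", "壬子", "癸丑", "甲寅", "乙卯", "丙辰", "丁巳", "戊午", "己未", "庚申", "辛酉", "壬戌", "癸亥"]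

-- ===== PORT A =====
-- A's 'while True' loop: state (num, b); fuel makes it total (the loop terminates exactly
-- when 0 ≤ num, which Pre_ guarantees; fuel num.toNat+1 then always suffices).
def pvLoopA (fuel : Nat) (num : Int) (b : List Int) : List Int :=
  match fuel with
  | 0 => b
  | fuel + 1 =>
    let s := PySem.Int.floordiv num 60
    let y := PySem.Int.mod num 60
    let b' := b ++ [y]
    if s = 0 then b' else pvLoopA fuel s b'

def Decimalint_to_sexagenary (num : Int) : String :=
  let b := pvLoopA (num.toNat + 1) num []
  let b := b.reverse
  -- for i in b: myres += a[i]   (a[i] never raises here: remainders lie in [0,60))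
  b.foldl (fun myres i => myres ++ PySem.List.pyGetD pvGanzhi i "") ""

-- ===== PORT B =====
-- B's recursion rec(n): q,r = divmod(n,60); a[r] if q == 0 else rec(q) + a[r]; fuel as above.
def pvRecB (fuel : Nat) (n : Int) : String :=
  match fuel with
  | 0 => ""
  | fuel + 1 =>
    let q := PySem.Int.floordiv n 60
    let r := PySem.Int.mod n 60
    if q = 0 then PySem.List.pyGetD pvGanzhi r ""
    else pvRecB fuel q ++ PySem.List.pyGetD pvGanzhi r ""

def Decimalint_to_sexagenary_alt (num : Int) : String :=
  pvRecB (num.toNat + 1) num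

-- ===== PRECONDITION & SPEC =====
-- On negative num A's while loop never reaches quotient 0 and hangs forever (and B's recursion
-- likewise diverges), so no value is returned there: Pre_ admits exactly the nonnegative inputs.
def Pre_Decimalint_to_sexagenary (num : Int) : Prop := 0 ≤ num
instance (num : Int) : Decidable (Pre_Decimalint_to_sexagenary num) := by unfold Pre_Decimalint_to_sexagenary; infer_instance
def pvWitness_Decimalint_to_sexagenary : Int := 123

def Spec_Decimalint_to_sexagenary (num : Int) (out : String) : Prop := out = Decimalint_to_sexagenary_alt num
instance (num : Int) (out : String) : Decidable (Spec_Decimalint_to_sexagenary num out) := by unfold Spec_Decimalint_to_sexagenary; infer_instance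

-- ===== CLAIM (what is proved, stated in full; the proofs are below) =====
def Claim_equal_Decimalint_to_sexagenary : Prop := ∀ (num : Int), Dom_Decimalint_to_sexagenary num → Pre_Decimalint_to_sexagenary num → Spec_Decimalint_to_sexagenary num (Decimalint_to_sexagenary num)

-- ===== LEMMAS AND PROOFS =====

-- A's loop only ever appends to its accumulator
theorem pvLoopA_acc (fuel : Nat) (num : Int) (b : List Int) :
    pvLoopA fuel num b = b ++ pvLoopA fuel num [] := by
  induction fuel generalizing num b with
  | zero => simp [pvLoopA]
  | succ fuel ih =>
    simp only [pvLoopA]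
    split_ifs with h
    · simp
    · rw [ih _ (b ++ _), ih _ ([] ++ _)]
      simp

-- pvRecB does not depend on the fuel once it exceeds the (nonnegative) value
theorem pvRecB_fuel_irrel (f1 f2 : Nat) (n : Int) (h0 : 0 ≤ n)
    (h1 : n.toNat < f1) (h2 : n.toNat < f2) : pvRecB f1 n = pvRecB f2 n := by
  induction f1 generalizing f2 n with
  | zero => omega
  | succ f1 ih =>
    cases f2 with
    | zero => omega
    | succ f2 =>
      simp only [pvRecB]
      split_ifs with h
      · rfl
      · have hq : PySem.Int.floordiv n 60 = n / 60 :=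
          PySem.Int.floordiv_eq_ediv_of_pos (by norm_num)
        have hs0 : 0 ≤ n / 60 := Int.ediv_nonneg h0 (by norm_num)
        rw [hq] at h
        have h60 : (1:ℤ) * 60 ≤ n := (Int.le_ediv_iff_mul_le (by norm_num)).mp (by omega)
        have hlt : n / 60 < n := by
          rw [Int.ediv_lt_iff_lt_mul (by norm_num : (0:ℤ) < 60)]
          nlinarith
        rw [hq, ih f2 (n / 60) hs0 (by omega) (by omega)]

-- the quotient shrinks, so fuel num.toNat+1 always suffices; render(reverse(digits)) = B's recursion
theorem pvLoop_eq_rec (fuel : Nat) (num : Int) (h0 : 0 ≤ num) (hf : num.toNat < fuel) :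
    (pvLoopA fuel num []).reverse.foldl (fun myres i => myres ++ PySem.List.pyGetD pvGanzhi i "") ""
      = pvRecB (num.toNat + 1) num := by
  induction fuel generalizing num with
  | zero => omega
  | succ fuel ih =>
    simp only [pvLoopA]
    have hq : PySem.Int.floordiv num 60 = num / 60 :=
      PySem.Int.floordiv_eq_ediv_of_pos (by norm_num)
    by_cases h : PySem.Int.floordiv num 60 = 0
    · -- single digit
      rw [if_pos h]
      conv_rhs => rw [pvRecB]
      rw [if_pos h]
      simp
    · rw [if_neg h]
      rw [hq] at h
      have hs0 : 0 ≤ num / 60 := Int.ediv_nonneg h0 (by norm_num)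
      have h60 : (1:ℤ) * 60 ≤ num := (Int.le_ediv_iff_mul_le (by norm_num)).mp (by omega)
      have hlt : num / 60 < num := by
        rw [Int.ediv_lt_iff_lt_mul (by norm_num : (0:ℤ) < 60)]
        nlinarith
      have hsf : (num / 60).toNat < fuel := by omega
      rw [pvLoopA_acc]
      simp only [List.nil_append, List.reverse_append, List.reverse_singleton,
        List.foldl_append, List.foldl_cons, List.foldl_nil]
      rw [hq, ih (num / 60) hs0 hsf]
      conv_rhs => rw [pvRecB]
      rw [hq, if_neg h]
      -- B's inner call runs with fuel num.toNat; pvRecB is fuel-insensitive above the value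
      rw [pvRecB_fuel_irrel ((num/60).toNat + 1) num.toNat (num/60) hs0 (by omega) (by omega)]

-- ===== VERDICT (by name: the statement is the Claim_ definition above) =====
theorem Decimalint_to_sexagenary_spec : Claim_equal_Decimalint_to_sexagenary := by
  intro num _ hpre
  unfold Spec_Decimalint_to_sexagenary Decimalint_to_sexagenary Decimalint_to_sexagenary_alt
  exact pvLoop_eq_rec (num.toNat + 1) num hpre (by omega)
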